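-- pv_equiv track=rewrite | github.com/muthareddycharankumar-ship-it/MediQ_Ai | backend/rag_system.py | is_medical_question
-- ===== SOURCE A (Python) =====
-- def is_medical_question(text):
--     """Returns True only if question contains actual medical/rheumatology terms."""
--     text = text.lower()
--
--     # These are purely medical/rheumatology terms
--     medical_terms = [
--         # Diseases
--         "arthritis", "lupus", "gout", "sle", "fibromyalgia", "vasculitis",
--         "sjogren", "spondylitis", "myositis", "scleroderma", "osteoporosis",
--         "osteoarthritis", "psoriatic", "rheumatoid", "ankylosing", "raynaud",
--         "polymyalgia", "behcet", "sarcoidosis", "myopathy", "autoimmune",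
--         "uveitis", "iritis", "episcleritis", "scleritis",
--         "tendinitis", "bursitis", "enthesitis", "synovitis", "tenosynovitis",
--         "vasculitis", "neuropathy", "myopathy", "nephritis", "pleuritis",
--         "pericarditis", "serositis", "amyloidosis", "raynaud",
--         # Symptoms
--         "joint pain", "joint swelling", "morning stiffness", "back pain",
--         "neck pain", "muscle pain", "muscle weakness", "fatigue",
--         "photosensitivity", "malar rash", "butterfly rash", "purpura",
--         "raynaud", "dry eyes", "dry mouth", "hair loss", "oral ulcer",
--         "dactylitis", "enthesitis", "sacroiliitis",
--         # Medical procedures/tests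
--         "synovial fluid", "arthrocentesis", "joint aspiration",
--         "anti-ccp", "rheumatoid factor", "ana", "anca", "anti-dsdna",
--         "hla-b27", "esr", "crp", "uric acid", "complement",
--         "x-ray", "mri", "ultrasound", "ct scan", "biopsy",
--         "das28", "cdai", "sdai", "basdai", "basfi", "sledai", "jadas",
--         # Drugs
--         "methotrexate", "hydroxychloroquine", "sulfasalazine", "leflunomide",
--         "etanercept", "adalimumab", "infliximab", "rituximab", "tocilizumab",
--         "abatacept", "baricitinib", "tofacitinib", "upadacitinib",
--         "allopurinol", "febuxostat", "colchicine", "probenecid",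
--         "prednisone", "prednisolone", "methylprednisolone",
--         "nsaid", "ibuprofen", "naproxen", "indomethacin", "celecoxib",
--         "metformin", "aspirin", "paracetamol", "statin",
--         "dmard", "biologic", "jak inhibitor", "tnf inhibitor",
--         # Body parts in medical context
--         "sacroiliac", "metatarsophalangeal", "metacarpophalangeal",
--         "interphalangeal", "temporomandibular",
--         # General medical
--         "diagnosis", "treatment", "prognosis", "pathogenesis", "etiology",
--         "inflammation", "autoantibody", "immunosuppression",
--         "remission", "flare", "disease activity", "comorbidity",
--         "birefringent", "crystal", "toph",
--         # Single word symptoms — IMPORTANT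
--         "pain", "stiffness", "swelling", "aching", "tender", "tenderness",
--         "redness", "warmth", "swollen", "inflamed", "inflammation",
--         "weakness", "numbness", "tingling", "burning", "throbbing",
--         "cramp", "spasm", "stiff", "sore", "soreness",
--         "immobile", "immobility", "limited motion", "restricted",
--         "limping", "walking difficulty", "difficulty walking",
--         "relief", "worse", "better", "aggravated", "morning",
--         "night pain", "rest pain", "weight bearing",
--         "fever", "rash", "sweat", "chills", "weight loss",
--         "leg pain", "knee pain", "hip pain", "shoulder pain",
--         "wrist pain", "ankle pain", "foot pain", "heel pain",
--         "spine", "lower back", "upper back", "neck", "joint", "nodule", "erosion",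
--         "macrophage", "cytokine", "interleukin", "tnf", "il-6",
--         "renal", "hepatic", "pulmonary", "cardiac", "neurological",
--     ]
--
--     return any(term in text for term in medical_terms)
-- ===== SOURCE B (Python) =====
-- """B: terms kept as short pipe-separated line strings split once at import; a dict keyed by
-- first character buckets the terms, and one left-to-right scan of the text tests only the
-- terms that can start at each position (A runs one full substring search per term)."""
--
-- _TERM_LINES = [
--     "arthritis|lupus|gout|sle|fibromyalgia",
--     "vasculitis|sjogren|spondylitis|myositis",
--     "scleroderma|osteoporosis|osteoarthritis",
--     "psoriatic|rheumatoid|ankylosing|raynaud",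
--     "polymyalgia|behcet|sarcoidosis|myopathy",
--     "autoimmune|uveitis|iritis|episcleritis",
--     "scleritis|tendinitis|bursitis|enthesitis",
--     "synovitis|tenosynovitis|vasculitis",
--     "neuropathy|myopathy|nephritis|pleuritis",
--     "pericarditis|serositis|amyloidosis",
--     "raynaud|joint pain|joint swelling",
--     "morning stiffness|back pain|neck pain",
--     "muscle pain|muscle weakness|fatigue",
--     "photosensitivity|malar rash",
--     "butterfly rash|purpura|raynaud|dry eyes",
--     "dry mouth|hair loss|oral ulcer",
--     "dactylitis|enthesitis|sacroiliitis",
--     "synovial fluid|arthrocentesis",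
--     "joint aspiration|anti-ccp",
--     "rheumatoid factor|ana|anca|anti-dsdna",
--     "hla-b27|esr|crp|uric acid|complement",
--     "x-ray|mri|ultrasound|ct scan|biopsy",
--     "das28|cdai|sdai|basdai|basfi|sledai",
--     "jadas|methotrexate|hydroxychloroquine",
--     "sulfasalazine|leflunomide|etanercept",
--     "adalimumab|infliximab|rituximab",
--     "tocilizumab|abatacept|baricitinib",
--     "tofacitinib|upadacitinib|allopurinol",
--     "febuxostat|colchicine|probenecid",
--     "prednisone|prednisolone",
--     "methylprednisolone|nsaid|ibuprofen",
--     "naproxen|indomethacin|celecoxib",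
--     "metformin|aspirin|paracetamol|statin",
--     "dmard|biologic|jak inhibitor",
--     "tnf inhibitor|sacroiliac",
--     "metatarsophalangeal|metacarpophalangeal",
--     "interphalangeal|temporomandibular",
--     "diagnosis|treatment|prognosis",
--     "pathogenesis|etiology|inflammation",
--     "autoantibody|immunosuppression|remission",
--     "flare|disease activity|comorbidity",
--     "birefringent|crystal|toph|pain|stiffness",
--     "swelling|aching|tender|tenderness",
--     "redness|warmth|swollen|inflamed",
--     "inflammation|weakness|numbness|tingling",
--     "burning|throbbing|cramp|spasm|stiff|sore",
--     "soreness|immobile|immobility",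
--     "limited motion|restricted|limping",
--     "walking difficulty|difficulty walking",
--     "relief|worse|better|aggravated|morning",
--     "night pain|rest pain|weight bearing",
--     "fever|rash|sweat|chills|weight loss",
--     "leg pain|knee pain|hip pain",
--     "shoulder pain|wrist pain|ankle pain",
--     "foot pain|heel pain|spine|lower back",
--     "upper back|neck|joint|nodule|erosion",
--     "macrophage|cytokine|interleukin|tnf|il-6",
--     "renal|hepatic|pulmonary|cardiac",
--     "neurological",
-- ]
--
-- _BUCKETS = {}
-- for _line in _TERM_LINES:
--     for _t in _line.split("|"):
--         _BUCKETS.setdefault(_t[0], []).append(_t)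
--
--
-- def is_medical_question(text):
--     text = text.lower()
--     for i, ch in enumerate(text):
--         for term in _BUCKETS.get(ch, ()):
--             if text.startswith(term, i):
--                 return True
--     return False
-- ===== Notes on version B (the rewrite author's own statement) =====
-- stated objective: alternative
-- what changed: A performs one full substring search over the text for each of the 203 terms; B stores the terms as short pipe-separated line strings split once at import, buckets them by first character in a dict, and makes a single left-to-right pass over the text testing at each position only the terms that could start there.
import Mathlib
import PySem

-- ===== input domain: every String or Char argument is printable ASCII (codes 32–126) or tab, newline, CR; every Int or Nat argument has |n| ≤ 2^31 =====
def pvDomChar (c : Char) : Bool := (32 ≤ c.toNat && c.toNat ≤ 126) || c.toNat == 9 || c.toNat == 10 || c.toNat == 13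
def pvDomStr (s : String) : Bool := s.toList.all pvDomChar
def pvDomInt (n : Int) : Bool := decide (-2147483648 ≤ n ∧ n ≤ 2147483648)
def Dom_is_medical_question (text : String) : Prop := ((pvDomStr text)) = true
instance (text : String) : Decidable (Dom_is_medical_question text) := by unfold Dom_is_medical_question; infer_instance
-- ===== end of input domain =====

-- ===== PORT A =====
-- B keeps the terms as short pipe-separated line strings split once at import, buckets them
-- by first character and makes one left-to-right scan of the text (objective: alternative
-- structure; not measured faster in CPython).

-- A's literal term list
def medicalTerms : List String := [
  "arthritis", "lupus", "gout", "sle", "fibromyalgia", "vasculitis", "sjogren", "spondylitis",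
  "myositis", "scleroderma", "osteoporosis", "osteoarthritis", "psoriatic", "rheumatoid",
  "ankylosing", "raynaud", "polymyalgia", "behcet", "sarcoidosis", "myopathy", "autoimmune",
  "uveitis", "iritis", "episcleritis", "scleritis", "tendinitis", "bursitis", "enthesitis",
  "synovitis", "tenosynovitis", "vasculitis", "neuropathy", "myopathy", "nephritis", "pleuritis",
  "pericarditis", "serositis", "amyloidosis", "raynaud", "joint pain", "joint swelling",
  "morning stiffness", "back pain", "neck pain", "muscle pain", "muscle weakness", "fatigue",
  "photosensitivity", "malar rash", "butterfly rash", "purpura", "raynaud", "dry eyes",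
  "dry mouth", "hair loss", "oral ulcer", "dactylitis", "enthesitis", "sacroiliitis",
  "synovial fluid", "arthrocentesis", "joint aspiration", "anti-ccp", "rheumatoid factor", "ana",
  "anca", "anti-dsdna", "hla-b27", "esr", "crp", "uric acid", "complement", "x-ray", "mri",
  "ultrasound", "ct scan", "biopsy", "das28", "cdai", "sdai", "basdai", "basfi", "sledai",
  "jadas", "methotrexate", "hydroxychloroquine", "sulfasalazine", "leflunomide", "etanercept",
  "adalimumab", "infliximab", "rituximab", "tocilizumab", "abatacept", "baricitinib",
  "tofacitinib", "upadacitinib", "allopurinol", "febuxostat", "colchicine", "probenecid",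
  "prednisone", "prednisolone", "methylprednisolone", "nsaid", "ibuprofen", "naproxen",
  "indomethacin", "celecoxib", "metformin", "aspirin", "paracetamol", "statin", "dmard",
  "biologic", "jak inhibitor", "tnf inhibitor", "sacroiliac", "metatarsophalangeal",
  "metacarpophalangeal", "interphalangeal", "temporomandibular", "diagnosis", "treatment",
  "prognosis", "pathogenesis", "etiology", "inflammation", "autoantibody", "immunosuppression",
  "remission", "flare", "disease activity", "comorbidity", "birefringent", "crystal", "toph",
  "pain", "stiffness", "swelling", "aching", "tender", "tenderness", "redness", "warmth",
  "swollen", "inflamed", "inflammation", "weakness", "numbness", "tingling", "burning",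
  "throbbing", "cramp", "spasm", "stiff", "sore", "soreness", "immobile", "immobility",
  "limited motion", "restricted", "limping", "walking difficulty", "difficulty walking",
  "relief", "worse", "better", "aggravated", "morning", "night pain", "rest pain",
  "weight bearing", "fever", "rash", "sweat", "chills", "weight loss", "leg pain", "knee pain",
  "hip pain", "shoulder pain", "wrist pain", "ankle pain", "foot pain", "heel pain", "spine",
  "lower back", "upper back", "neck", "joint", "nodule", "erosion", "macrophage", "cytokine",
  "interleukin", "tnf", "il-6", "renal", "hepatic", "pulmonary", "cardiac", "neurological"]

-- A: text = text.lower(); return any(term in text for term in medical_terms)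
def is_medical_question (text : String) : Bool :=
  medicalTerms.any (fun term => PySem.Str.isIn term (PySem.Str.lower text))

-- ===== PORT B =====
-- module-level _TERM_LINES of Source B
def termLines : List String := [
  "arthritis|lupus|gout|sle|fibromyalgia",
  "vasculitis|sjogren|spondylitis|myositis",
  "scleroderma|osteoporosis|osteoarthritis",
  "psoriatic|rheumatoid|ankylosing|raynaud",
  "polymyalgia|behcet|sarcoidosis|myopathy",
  "autoimmune|uveitis|iritis|episcleritis",
  "scleritis|tendinitis|bursitis|enthesitis",
  "synovitis|tenosynovitis|vasculitis",
  "neuropathy|myopathy|nephritis|pleuritis",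
  "pericarditis|serositis|amyloidosis",
  "raynaud|joint pain|joint swelling",
  "morning stiffness|back pain|neck pain",
  "muscle pain|muscle weakness|fatigue",
  "photosensitivity|malar rash",
  "butterfly rash|purpura|raynaud|dry eyes",
  "dry mouth|hair loss|oral ulcer",
  "dactylitis|enthesitis|sacroiliitis",
  "synovial fluid|arthrocentesis",
  "joint aspiration|anti-ccp",
  "rheumatoid factor|ana|anca|anti-dsdna",
  "hla-b27|esr|crp|uric acid|complement",
  "x-ray|mri|ultrasound|ct scan|biopsy",
  "das28|cdai|sdai|basdai|basfi|sledai",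
  "jadas|methotrexate|hydroxychloroquine",
  "sulfasalazine|leflunomide|etanercept",
  "adalimumab|infliximab|rituximab",
  "tocilizumab|abatacept|baricitinib",
  "tofacitinib|upadacitinib|allopurinol",
  "febuxostat|colchicine|probenecid",
  "prednisone|prednisolone",
  "methylprednisolone|nsaid|ibuprofen",
  "naproxen|indomethacin|celecoxib",
  "metformin|aspirin|paracetamol|statin",
  "dmard|biologic|jak inhibitor",
  "tnf inhibitor|sacroiliac",
  "metatarsophalangeal|metacarpophalangeal",
  "interphalangeal|temporomandibular",
  "diagnosis|treatment|prognosis",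
  "pathogenesis|etiology|inflammation",
  "autoantibody|immunosuppression|remission",
  "flare|disease activity|comorbidity",
  "birefringent|crystal|toph|pain|stiffness",
  "swelling|aching|tender|tenderness",
  "redness|warmth|swollen|inflamed",
  "inflammation|weakness|numbness|tingling",
  "burning|throbbing|cramp|spasm|stiff|sore",
  "soreness|immobile|immobility",
  "limited motion|restricted|limping",
  "walking difficulty|difficulty walking",
  "relief|worse|better|aggravated|morning",
  "night pain|rest pain|weight bearing",
  "fever|rash|sweat|chills|weight loss",
  "leg pain|knee pain|hip pain",
  "shoulder pain|wrist pain|ankle pain",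
  "foot pain|heel pain|spine|lower back",
  "upper back|neck|joint|nodule|erosion",
  "macrophage|cytokine|interleukin|tnf|il-6",
  "renal|hepatic|pulmonary|cardiac",
  "neurological"]

-- _line.split("|")  ("|" is nonempty, so Python's split never raises;
-- PySem.Chars.splitOn is exactly that non-empty-separator split, on code points)
def lineTerms (line : String) : List String :=
  (PySem.Chars.splitOn line.toList "|".toList).map String.ofList

-- the terms produced by the nested module-level loop, line by line
def termList : List String := termLines.flatMap lineTerms

-- _t[0]  (every piece of every line is nonempty, so Python's _t[0] never raises)
def firstCharKey (t : String) : Char := t.toList.head!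

-- _BUCKETS = {}; for _line in _TERM_LINES: for _t in _line.split("|"): _BUCKETS.setdefault(_t[0], []).append(_t)
def termBuckets : PySem.Dict Char (List String) :=
  termList.foldl
    (fun d t => d.insert (firstCharKey t) (d.getD (firstCharKey t) [] ++ [t]))
    PySem.Dict.empty

-- for i, ch in enumerate(text): for term in _BUCKETS.get(ch, ()): if text.startswith(term, i): return True
-- as structural recursion over the suffixes of the text
def scanFrom : List Char → Bool
  | [] => false
  | c :: rest =>
    (termBuckets.getD c []).any (fun term => PySem.Chars.startswith (c :: rest) term.toList)
      || scanFrom rest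

def is_medical_question_alt (text : String) : Bool :=
  scanFrom (PySem.Str.lower text).toList

-- ===== PRECONDITION & SPEC =====
def Spec_is_medical_question (text : String) (out : Bool) : Prop := out = is_medical_question_alt text
instance (text : String) (out : Bool) : Decidable (Spec_is_medical_question text out) := by unfold Spec_is_medical_question; infer_instance

-- ===== CLAIM (what is proved, stated in full; the proofs are below) =====
def Claim_equal_is_medical_question : Prop := ∀ (text : String), Dom_is_medical_question text → Spec_is_medical_question text (is_medical_question text)

-- ===== LEMMAS AND PROOFS =====

-- a reference model of Python's single-character split, and its agreement with
-- PySem.Chars.splitOn (which is fuel-based) and with List.intercalate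
def msplit (c : Char) : List Char → List (List Char)
  | [] => [[]]
  | x :: xs => if x = c then [] :: msplit c xs
               else match msplit c xs with
                    | [] => [[x]]
                    | p :: ps => (x :: p) :: ps

def consHead (pre : List Char) : List (List Char) → List (List Char)
  | [] => [pre]
  | p :: ps => (pre ++ p) :: ps

theorem msplit_ne_nil (c : Char) (l : List Char) : msplit c l ≠ [] := by
  cases l with
  | nil => simp [msplit]
  | cons x xs =>
    simp only [msplit]
    split_ifs
    · simp
    · cases h : msplit c xs <;> simp

theorem go_spec' (c : Char) (fuel : Nat) :
    ∀ (l cur : List Char) (acc : List (List Char)), l.length < fuel →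
    PySem.Chars.splitOn.go [c] fuel l cur acc = acc.reverse ++ consHead cur.reverse (msplit c l) := by
  induction fuel with
  | zero => intro l cur acc h; omega
  | succ f ih =>
    intro l cur acc h
    cases l with
    | nil =>
      rw [PySem.Chars.splitOn.go]
      simp [msplit, consHead]
      omega
    | cons x xs =>
      rw [PySem.Chars.splitOn.go]
      simp only [List.isPrefixOf, Bool.and_true]
      by_cases hc : x = c
      · simp only [hc, beq_self_eq_true, if_true]
        rw [ih _ _ _ (by simpa using Nat.lt_of_succ_lt_succ h)]
        simp only [msplit, if_pos hc, consHead, List.reverse_cons, List.reverse_nil,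
          List.nil_append, List.append_assoc, List.cons_append, List.singleton_append]
        cases hm : msplit c xs with
        | nil => exact absurd hm (msplit_ne_nil c xs)
        | cons p ps => simp [hm]
      · have hcx : (c == x) = false := by simp [Ne.symm hc]
        simp only [hcx, Bool.false_eq_true, if_false]
        rw [ih _ _ _ (by simpa using Nat.lt_of_succ_lt_succ h)]
        simp only [msplit, if_neg hc]
        cases hm : msplit c xs with
        | nil => exact absurd hm (msplit_ne_nil c xs)
        | cons p ps => simp [consHead]

theorem splitOn_eq_msplit (c : Char) (s : List Char) :
    PySem.Chars.splitOn s [c] = msplit c s := by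
  rw [PySem.Chars.splitOn, go_spec' c (s.length+1) s [] [] (by omega)]
  cases hm : msplit c s with
  | nil => exact absurd hm (msplit_ne_nil c s)
  | cons p ps => simp [consHead]

theorem msplit_append (c : Char) (p l : List Char) (hc : c ∉ p) :
    msplit c (p ++ l) = consHead p (msplit c l) := by
  induction p with
  | nil =>
    cases hm : msplit c l with
    | nil => exact absurd hm (msplit_ne_nil c l)
    | cons q qs => simpa [consHead] using hm
  | cons x p ih =>
    have hx : x ≠ c := fun h => hc (h ▸ List.mem_cons_self)
    have hp : c ∉ p := fun h => hc (List.mem_cons_of_mem _ h)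
    simp only [List.cons_append, msplit, if_neg hx, ih hp]
    cases hm : msplit c l with
    | nil => exact absurd hm (msplit_ne_nil c l)
    | cons q qs => simp [consHead]

theorem msplit_join (c : Char) (parts : List (List Char)) (hne : parts ≠ [])
    (hc : ∀ p ∈ parts, c ∉ p) : msplit c ([c].intercalate parts) = parts := by
  induction parts with
  | nil => exact absurd rfl hne
  | cons p ps ih =>
    cases ps with
    | nil =>
      have h1 : [c].intercalate [p] = p := by simp [List.intercalate]
      rw [h1, ← List.append_nil p, msplit_append c p [] (by simpa using hc p List.mem_cons_self)]
      simp [msplit, consHead]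
    | cons q qs =>
      have hic : [c].intercalate (p :: q :: qs) = p ++ ([c] ++ [c].intercalate (q :: qs)) := by
        simp [List.intercalate, List.intersperse]
      rw [hic, msplit_append c p _ (hc p List.mem_cons_self)]
      simp only [List.singleton_append]
      have h2 : msplit c (c :: [c].intercalate (q :: qs)) = [] :: msplit c ([c].intercalate (q :: qs)) := by
        simp [msplit]
      rw [h2, ih (by simp) (fun r hr => hc r (List.mem_cons_of_mem _ hr))]
      simp [consHead]

-- each line of B, split, is exactly its stretch of A's term list
set_option maxRecDepth 40000 in
theorem chunk_0 : lineTerms "arthritis|lupus|gout|sle|fibromyalgia" = ["arthritis", "lupus", "gout", "sle", "fibromyalgia"] := by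
  rw [lineTerms, show ("|".toList) = ['|'] from rfl, splitOn_eq_msplit,
    show ("arthritis|lupus|gout|sle|fibromyalgia".toList) = ['|'].intercalate (["arthritis", "lupus", "gout", "sle", "fibromyalgia"].map String.toList) from by decide,
    msplit_join '|' _ (by simp) (by decide)]
  decide

set_option maxRecDepth 40000 in
theorem chunk_1 : lineTerms "vasculitis|sjogren|spondylitis|myositis" = ["vasculitis", "sjogren", "spondylitis", "myositis"] := by
  rw [lineTerms, show ("|".toList) = ['|'] from rfl, splitOn_eq_msplit,
    show ("vasculitis|sjogren|spondylitis|myositis".toList) = ['|'].intercalate (["vasculitis", "sjogren", "spondylitis", "myositis"].map String.toList) from by decide,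
    msplit_join '|' _ (by simp) (by decide)]
  decide

set_option maxRecDepth 40000 in
theorem chunk_2 : lineTerms "scleroderma|osteoporosis|osteoarthritis" = ["scleroderma", "osteoporosis", "osteoarthritis"] := by
  rw [lineTerms, show ("|".toList) = ['|'] from rfl, splitOn_eq_msplit,
    show ("scleroderma|osteoporosis|osteoarthritis".toList) = ['|'].intercalate (["scleroderma", "osteoporosis", "osteoarthritis"].map String.toList) from by decide,
    msplit_join '|' _ (by simp) (by decide)]
  decide

set_option maxRecDepth 40000 in
theorem chunk_3 : lineTerms "psoriatic|rheumatoid|ankylosing|raynaud" = ["psoriatic", "rheumatoid", "ankylosing", "raynaud"] := by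
  rw [lineTerms, show ("|".toList) = ['|'] from rfl, splitOn_eq_msplit,
    show ("psoriatic|rheumatoid|ankylosing|raynaud".toList) = ['|'].intercalate (["psoriatic", "rheumatoid", "ankylosing", "raynaud"].map String.toList) from by decide,
    msplit_join '|' _ (by simp) (by decide)]
  decide

set_option maxRecDepth 40000 in
theorem chunk_4 : lineTerms "polymyalgia|behcet|sarcoidosis|myopathy" = ["polymyalgia", "behcet", "sarcoidosis", "myopathy"] := by
  rw [lineTerms, show ("|".toList) = ['|'] from rfl, splitOn_eq_msplit,
    show ("polymyalgia|behcet|sarcoidosis|myopathy".toList) = ['|'].intercalate (["polymyalgia", "behcet", "sarcoidosis", "myopathy"].map String.toList) from by decide,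
    msplit_join '|' _ (by simp) (by decide)]
  decide

set_option maxRecDepth 40000 in
theorem chunk_5 : lineTerms "autoimmune|uveitis|iritis|episcleritis" = ["autoimmune", "uveitis", "iritis", "episcleritis"] := by
  rw [lineTerms, show ("|".toList) = ['|'] from rfl, splitOn_eq_msplit,
    show ("autoimmune|uveitis|iritis|episcleritis".toList) = ['|'].intercalate (["autoimmune", "uveitis", "iritis", "episcleritis"].map String.toList) from by decide,
    msplit_join '|' _ (by simp) (by decide)]
  decide

set_option maxRecDepth 40000 in
theorem chunk_6 : lineTerms "scleritis|tendinitis|bursitis|enthesitis" = ["scleritis", "tendinitis", "bursitis", "enthesitis"] := by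
  rw [lineTerms, show ("|".toList) = ['|'] from rfl, splitOn_eq_msplit,
    show ("scleritis|tendinitis|bursitis|enthesitis".toList) = ['|'].intercalate (["scleritis", "tendinitis", "bursitis", "enthesitis"].map String.toList) from by decide,
    msplit_join '|' _ (by simp) (by decide)]
  decide

set_option maxRecDepth 40000 in
theorem chunk_7 : lineTerms "synovitis|tenosynovitis|vasculitis" = ["synovitis", "tenosynovitis", "vasculitis"] := by
  rw [lineTerms, show ("|".toList) = ['|'] from rfl, splitOn_eq_msplit,
    show ("synovitis|tenosynovitis|vasculitis".toList) = ['|'].intercalate (["synovitis", "tenosynovitis", "vasculitis"].map String.toList) from by decide,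
    msplit_join '|' _ (by simp) (by decide)]
  decide

set_option maxRecDepth 40000 in
theorem chunk_8 : lineTerms "neuropathy|myopathy|nephritis|pleuritis" = ["neuropathy", "myopathy", "nephritis", "pleuritis"] := by
  rw [lineTerms, show ("|".toList) = ['|'] from rfl, splitOn_eq_msplit,
    show ("neuropathy|myopathy|nephritis|pleuritis".toList) = ['|'].intercalate (["neuropathy", "myopathy", "nephritis", "pleuritis"].map String.toList) from by decide,
    msplit_join '|' _ (by simp) (by decide)]
  decide

set_option maxRecDepth 40000 in
theorem chunk_9 : lineTerms "pericarditis|serositis|amyloidosis" = ["pericarditis", "serositis", "amyloidosis"] := by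
  rw [lineTerms, show ("|".toList) = ['|'] from rfl, splitOn_eq_msplit,
    show ("pericarditis|serositis|amyloidosis".toList) = ['|'].intercalate (["pericarditis", "serositis", "amyloidosis"].map String.toList) from by decide,
    msplit_join '|' _ (by simp) (by decide)]
  decide

set_option maxRecDepth 40000 in
theorem chunk_10 : lineTerms "raynaud|joint pain|joint swelling" = ["raynaud", "joint pain", "joint swelling"] := by
  rw [lineTerms, show ("|".toList) = ['|'] from rfl, splitOn_eq_msplit,
    show ("raynaud|joint pain|joint swelling".toList) = ['|'].intercalate (["raynaud", "joint pain", "joint swelling"].map String.toList) from by decide,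
    msplit_join '|' _ (by simp) (by decide)]
  decide

set_option maxRecDepth 40000 in
theorem chunk_11 : lineTerms "morning stiffness|back pain|neck pain" = ["morning stiffness", "back pain", "neck pain"] := by
  rw [lineTerms, show ("|".toList) = ['|'] from rfl, splitOn_eq_msplit,
    show ("morning stiffness|back pain|neck pain".toList) = ['|'].intercalate (["morning stiffness", "back pain", "neck pain"].map String.toList) from by decide,
    msplit_join '|' _ (by simp) (by decide)]
  decide

set_option maxRecDepth 40000 in
theorem chunk_12 : lineTerms "muscle pain|muscle weakness|fatigue" = ["muscle pain", "muscle weakness", "fatigue"] := by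
  rw [lineTerms, show ("|".toList) = ['|'] from rfl, splitOn_eq_msplit,
    show ("muscle pain|muscle weakness|fatigue".toList) = ['|'].intercalate (["muscle pain", "muscle weakness", "fatigue"].map String.toList) from by decide,
    msplit_join '|' _ (by simp) (by decide)]
  decide

set_option maxRecDepth 40000 in
theorem chunk_13 : lineTerms "photosensitivity|malar rash" = ["photosensitivity", "malar rash"] := by
  rw [lineTerms, show ("|".toList) = ['|'] from rfl, splitOn_eq_msplit,
    show ("photosensitivity|malar rash".toList) = ['|'].intercalate (["photosensitivity", "malar rash"].map String.toList) from by decide,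
    msplit_join '|' _ (by simp) (by decide)]
  decide

set_option maxRecDepth 40000 in
theorem chunk_14 : lineTerms "butterfly rash|purpura|raynaud|dry eyes" = ["butterfly rash", "purpura", "raynaud", "dry eyes"] := by
  rw [lineTerms, show ("|".toList) = ['|'] from rfl, splitOn_eq_msplit,
    show ("butterfly rash|purpura|raynaud|dry eyes".toList) = ['|'].intercalate (["butterfly rash", "purpura", "raynaud", "dry eyes"].map String.toList) from by decide,
    msplit_join '|' _ (by simp) (by decide)]
  decide

set_option maxRecDepth 40000 in
theorem chunk_15 : lineTerms "dry mouth|hair loss|oral ulcer" = ["dry mouth", "hair loss", "oral ulcer"] := by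
  rw [lineTerms, show ("|".toList) = ['|'] from rfl, splitOn_eq_msplit,
    show ("dry mouth|hair loss|oral ulcer".toList) = ['|'].intercalate (["dry mouth", "hair loss", "oral ulcer"].map String.toList) from by decide,
    msplit_join '|' _ (by simp) (by decide)]
  decide

set_option maxRecDepth 40000 in
theorem chunk_16 : lineTerms "dactylitis|enthesitis|sacroiliitis" = ["dactylitis", "enthesitis", "sacroiliitis"] := by
  rw [lineTerms, show ("|".toList) = ['|'] from rfl, splitOn_eq_msplit,
    show ("dactylitis|enthesitis|sacroiliitis".toList) = ['|'].intercalate (["dactylitis", "enthesitis", "sacroiliitis"].map String.toList) from by decide,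
    msplit_join '|' _ (by simp) (by decide)]
  decide

set_option maxRecDepth 40000 in
theorem chunk_17 : lineTerms "synovial fluid|arthrocentesis" = ["synovial fluid", "arthrocentesis"] := by
  rw [lineTerms, show ("|".toList) = ['|'] from rfl, splitOn_eq_msplit,
    show ("synovial fluid|arthrocentesis".toList) = ['|'].intercalate (["synovial fluid", "arthrocentesis"].map String.toList) from by decide,
    msplit_join '|' _ (by simp) (by decide)]
  decide

set_option maxRecDepth 40000 in
theorem chunk_18 : lineTerms "joint aspiration|anti-ccp" = ["joint aspiration", "anti-ccp"] := by
  rw [lineTerms, show ("|".toList) = ['|'] from rfl, splitOn_eq_msplit,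
    show ("joint aspiration|anti-ccp".toList) = ['|'].intercalate (["joint aspiration", "anti-ccp"].map String.toList) from by decide,
    msplit_join '|' _ (by simp) (by decide)]
  decide

set_option maxRecDepth 40000 in
theorem chunk_19 : lineTerms "rheumatoid factor|ana|anca|anti-dsdna" = ["rheumatoid factor", "ana", "anca", "anti-dsdna"] := by
  rw [lineTerms, show ("|".toList) = ['|'] from rfl, splitOn_eq_msplit,
    show ("rheumatoid factor|ana|anca|anti-dsdna".toList) = ['|'].intercalate (["rheumatoid factor", "ana", "anca", "anti-dsdna"].map String.toList) from by decide,
    msplit_join '|' _ (by simp) (by decide)]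
  decide

set_option maxRecDepth 40000 in
theorem chunk_20 : lineTerms "hla-b27|esr|crp|uric acid|complement" = ["hla-b27", "esr", "crp", "uric acid", "complement"] := by
  rw [lineTerms, show ("|".toList) = ['|'] from rfl, splitOn_eq_msplit,
    show ("hla-b27|esr|crp|uric acid|complement".toList) = ['|'].intercalate (["hla-b27", "esr", "crp", "uric acid", "complement"].map String.toList) from by decide,
    msplit_join '|' _ (by simp) (by decide)]
  decide

set_option maxRecDepth 40000 in
theorem chunk_21 : lineTerms "x-ray|mri|ultrasound|ct scan|biopsy" = ["x-ray", "mri", "ultrasound", "ct scan", "biopsy"] := by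
  rw [lineTerms, show ("|".toList) = ['|'] from rfl, splitOn_eq_msplit,
    show ("x-ray|mri|ultrasound|ct scan|biopsy".toList) = ['|'].intercalate (["x-ray", "mri", "ultrasound", "ct scan", "biopsy"].map String.toList) from by decide,
    msplit_join '|' _ (by simp) (by decide)]
  decide

set_option maxRecDepth 40000 in
theorem chunk_22 : lineTerms "das28|cdai|sdai|basdai|basfi|sledai" = ["das28", "cdai", "sdai", "basdai", "basfi", "sledai"] := by
  rw [lineTerms, show ("|".toList) = ['|'] from rfl, splitOn_eq_msplit,
    show ("das28|cdai|sdai|basdai|basfi|sledai".toList) = ['|'].intercalate (["das28", "cdai", "sdai", "basdai", "basfi", "sledai"].map String.toList) from by decide,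
    msplit_join '|' _ (by simp) (by decide)]
  decide

set_option maxRecDepth 40000 in
theorem chunk_23 : lineTerms "jadas|methotrexate|hydroxychloroquine" = ["jadas", "methotrexate", "hydroxychloroquine"] := by
  rw [lineTerms, show ("|".toList) = ['|'] from rfl, splitOn_eq_msplit,
    show ("jadas|methotrexate|hydroxychloroquine".toList) = ['|'].intercalate (["jadas", "methotrexate", "hydroxychloroquine"].map String.toList) from by decide,
    msplit_join '|' _ (by simp) (by decide)]
  decide

set_option maxRecDepth 40000 in
theorem chunk_24 : lineTerms "sulfasalazine|leflunomide|etanercept" = ["sulfasalazine", "leflunomide", "etanercept"] := by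
  rw [lineTerms, show ("|".toList) = ['|'] from rfl, splitOn_eq_msplit,
    show ("sulfasalazine|leflunomide|etanercept".toList) = ['|'].intercalate (["sulfasalazine", "leflunomide", "etanercept"].map String.toList) from by decide,
    msplit_join '|' _ (by simp) (by decide)]
  decide

set_option maxRecDepth 40000 in
theorem chunk_25 : lineTerms "adalimumab|infliximab|rituximab" = ["adalimumab", "infliximab", "rituximab"] := by
  rw [lineTerms, show ("|".toList) = ['|'] from rfl, splitOn_eq_msplit,
    show ("adalimumab|infliximab|rituximab".toList) = ['|'].intercalate (["adalimumab", "infliximab", "rituximab"].map String.toList) from by decide,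
    msplit_join '|' _ (by simp) (by decide)]
  decide

set_option maxRecDepth 40000 in
theorem chunk_26 : lineTerms "tocilizumab|abatacept|baricitinib" = ["tocilizumab", "abatacept", "baricitinib"] := by
  rw [lineTerms, show ("|".toList) = ['|'] from rfl, splitOn_eq_msplit,
    show ("tocilizumab|abatacept|baricitinib".toList) = ['|'].intercalate (["tocilizumab", "abatacept", "baricitinib"].map String.toList) from by decide,
    msplit_join '|' _ (by simp) (by decide)]
  decide

set_option maxRecDepth 40000 in
theorem chunk_27 : lineTerms "tofacitinib|upadacitinib|allopurinol" = ["tofacitinib", "upadacitinib", "allopurinol"] := by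
  rw [lineTerms, show ("|".toList) = ['|'] from rfl, splitOn_eq_msplit,
    show ("tofacitinib|upadacitinib|allopurinol".toList) = ['|'].intercalate (["tofacitinib", "upadacitinib", "allopurinol"].map String.toList) from by decide,
    msplit_join '|' _ (by simp) (by decide)]
  decide

set_option maxRecDepth 40000 in
theorem chunk_28 : lineTerms "febuxostat|colchicine|probenecid" = ["febuxostat", "colchicine", "probenecid"] := by
  rw [lineTerms, show ("|".toList) = ['|'] from rfl, splitOn_eq_msplit,
    show ("febuxostat|colchicine|probenecid".toList) = ['|'].intercalate (["febuxostat", "colchicine", "probenecid"].map String.toList) from by decide,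
    msplit_join '|' _ (by simp) (by decide)]
  decide

set_option maxRecDepth 40000 in
theorem chunk_29 : lineTerms "prednisone|prednisolone" = ["prednisone", "prednisolone"] := by
  rw [lineTerms, show ("|".toList) = ['|'] from rfl, splitOn_eq_msplit,
    show ("prednisone|prednisolone".toList) = ['|'].intercalate (["prednisone", "prednisolone"].map String.toList) from by decide,
    msplit_join '|' _ (by simp) (by decide)]
  decide

set_option maxRecDepth 40000 in
theorem chunk_30 : lineTerms "methylprednisolone|nsaid|ibuprofen" = ["methylprednisolone", "nsaid", "ibuprofen"] := by
  rw [lineTerms, show ("|".toList) = ['|'] from rfl, splitOn_eq_msplit,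
    show ("methylprednisolone|nsaid|ibuprofen".toList) = ['|'].intercalate (["methylprednisolone", "nsaid", "ibuprofen"].map String.toList) from by decide,
    msplit_join '|' _ (by simp) (by decide)]
  decide

set_option maxRecDepth 40000 in
theorem chunk_31 : lineTerms "naproxen|indomethacin|celecoxib" = ["naproxen", "indomethacin", "celecoxib"] := by
  rw [lineTerms, show ("|".toList) = ['|'] from rfl, splitOn_eq_msplit,
    show ("naproxen|indomethacin|celecoxib".toList) = ['|'].intercalate (["naproxen", "indomethacin", "celecoxib"].map String.toList) from by decide,
    msplit_join '|' _ (by simp) (by decide)]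
  decide

set_option maxRecDepth 40000 in
theorem chunk_32 : lineTerms "metformin|aspirin|paracetamol|statin" = ["metformin", "aspirin", "paracetamol", "statin"] := by
  rw [lineTerms, show ("|".toList) = ['|'] from rfl, splitOn_eq_msplit,
    show ("metformin|aspirin|paracetamol|statin".toList) = ['|'].intercalate (["metformin", "aspirin", "paracetamol", "statin"].map String.toList) from by decide,
    msplit_join '|' _ (by simp) (by decide)]
  decide

set_option maxRecDepth 40000 in
theorem chunk_33 : lineTerms "dmard|biologic|jak inhibitor" = ["dmard", "biologic", "jak inhibitor"] := by
  rw [lineTerms, show ("|".toList) = ['|'] from rfl, splitOn_eq_msplit,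
    show ("dmard|biologic|jak inhibitor".toList) = ['|'].intercalate (["dmard", "biologic", "jak inhibitor"].map String.toList) from by decide,
    msplit_join '|' _ (by simp) (by decide)]
  decide

set_option maxRecDepth 40000 in
theorem chunk_34 : lineTerms "tnf inhibitor|sacroiliac" = ["tnf inhibitor", "sacroiliac"] := by
  rw [lineTerms, show ("|".toList) = ['|'] from rfl, splitOn_eq_msplit,
    show ("tnf inhibitor|sacroiliac".toList) = ['|'].intercalate (["tnf inhibitor", "sacroiliac"].map String.toList) from by decide,
    msplit_join '|' _ (by simp) (by decide)]
  decide

set_option maxRecDepth 40000 in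
theorem chunk_35 : lineTerms "metatarsophalangeal|metacarpophalangeal" = ["metatarsophalangeal", "metacarpophalangeal"] := by
  rw [lineTerms, show ("|".toList) = ['|'] from rfl, splitOn_eq_msplit,
    show ("metatarsophalangeal|metacarpophalangeal".toList) = ['|'].intercalate (["metatarsophalangeal", "metacarpophalangeal"].map String.toList) from by decide,
    msplit_join '|' _ (by simp) (by decide)]
  decide

set_option maxRecDepth 40000 in
theorem chunk_36 : lineTerms "interphalangeal|temporomandibular" = ["interphalangeal", "temporomandibular"] := by
  rw [lineTerms, show ("|".toList) = ['|'] from rfl, splitOn_eq_msplit,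
    show ("interphalangeal|temporomandibular".toList) = ['|'].intercalate (["interphalangeal", "temporomandibular"].map String.toList) from by decide,
    msplit_join '|' _ (by simp) (by decide)]
  decide

set_option maxRecDepth 40000 in
theorem chunk_37 : lineTerms "diagnosis|treatment|prognosis" = ["diagnosis", "treatment", "prognosis"] := by
  rw [lineTerms, show ("|".toList) = ['|'] from rfl, splitOn_eq_msplit,
    show ("diagnosis|treatment|prognosis".toList) = ['|'].intercalate (["diagnosis", "treatment", "prognosis"].map String.toList) from by decide,
    msplit_join '|' _ (by simp) (by decide)]
  decide

set_option maxRecDepth 40000 in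
theorem chunk_38 : lineTerms "pathogenesis|etiology|inflammation" = ["pathogenesis", "etiology", "inflammation"] := by
  rw [lineTerms, show ("|".toList) = ['|'] from rfl, splitOn_eq_msplit,
    show ("pathogenesis|etiology|inflammation".toList) = ['|'].intercalate (["pathogenesis", "etiology", "inflammation"].map String.toList) from by decide,
    msplit_join '|' _ (by simp) (by decide)]
  decide

set_option maxRecDepth 40000 in
theorem chunk_39 : lineTerms "autoantibody|immunosuppression|remission" = ["autoantibody", "immunosuppression", "remission"] := by
  rw [lineTerms, show ("|".toList) = ['|'] from rfl, splitOn_eq_msplit,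
    show ("autoantibody|immunosuppression|remission".toList) = ['|'].intercalate (["autoantibody", "immunosuppression", "remission"].map String.toList) from by decide,
    msplit_join '|' _ (by simp) (by decide)]
  decide

set_option maxRecDepth 40000 in
theorem chunk_40 : lineTerms "flare|disease activity|comorbidity" = ["flare", "disease activity", "comorbidity"] := by
  rw [lineTerms, show ("|".toList) = ['|'] from rfl, splitOn_eq_msplit,
    show ("flare|disease activity|comorbidity".toList) = ['|'].intercalate (["flare", "disease activity", "comorbidity"].map String.toList) from by decide,
    msplit_join '|' _ (by simp) (by decide)]
  decide

set_option maxRecDepth 40000 in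
theorem chunk_41 : lineTerms "birefringent|crystal|toph|pain|stiffness" = ["birefringent", "crystal", "toph", "pain", "stiffness"] := by
  rw [lineTerms, show ("|".toList) = ['|'] from rfl, splitOn_eq_msplit,
    show ("birefringent|crystal|toph|pain|stiffness".toList) = ['|'].intercalate (["birefringent", "crystal", "toph", "pain", "stiffness"].map String.toList) from by decide,
    msplit_join '|' _ (by simp) (by decide)]
  decide

set_option maxRecDepth 40000 in
theorem chunk_42 : lineTerms "swelling|aching|tender|tenderness" = ["swelling", "aching", "tender", "tenderness"] := by
  rw [lineTerms, show ("|".toList) = ['|'] from rfl, splitOn_eq_msplit,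
    show ("swelling|aching|tender|tenderness".toList) = ['|'].intercalate (["swelling", "aching", "tender", "tenderness"].map String.toList) from by decide,
    msplit_join '|' _ (by simp) (by decide)]
  decide

set_option maxRecDepth 40000 in
theorem chunk_43 : lineTerms "redness|warmth|swollen|inflamed" = ["redness", "warmth", "swollen", "inflamed"] := by
  rw [lineTerms, show ("|".toList) = ['|'] from rfl, splitOn_eq_msplit,
    show ("redness|warmth|swollen|inflamed".toList) = ['|'].intercalate (["redness", "warmth", "swollen", "inflamed"].map String.toList) from by decide,
    msplit_join '|' _ (by simp) (by decide)]
  decide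

set_option maxRecDepth 40000 in
theorem chunk_44 : lineTerms "inflammation|weakness|numbness|tingling" = ["inflammation", "weakness", "numbness", "tingling"] := by
  rw [lineTerms, show ("|".toList) = ['|'] from rfl, splitOn_eq_msplit,
    show ("inflammation|weakness|numbness|tingling".toList) = ['|'].intercalate (["inflammation", "weakness", "numbness", "tingling"].map String.toList) from by decide,
    msplit_join '|' _ (by simp) (by decide)]
  decide

set_option maxRecDepth 40000 in
theorem chunk_45 : lineTerms "burning|throbbing|cramp|spasm|stiff|sore" = ["burning", "throbbing", "cramp", "spasm", "stiff", "sore"] := by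
  rw [lineTerms, show ("|".toList) = ['|'] from rfl, splitOn_eq_msplit,
    show ("burning|throbbing|cramp|spasm|stiff|sore".toList) = ['|'].intercalate (["burning", "throbbing", "cramp", "spasm", "stiff", "sore"].map String.toList) from by decide,
    msplit_join '|' _ (by simp) (by decide)]
  decide

set_option maxRecDepth 40000 in
theorem chunk_46 : lineTerms "soreness|immobile|immobility" = ["soreness", "immobile", "immobility"] := by
  rw [lineTerms, show ("|".toList) = ['|'] from rfl, splitOn_eq_msplit,
    show ("soreness|immobile|immobility".toList) = ['|'].intercalate (["soreness", "immobile", "immobility"].map String.toList) from by decide,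
    msplit_join '|' _ (by simp) (by decide)]
  decide

set_option maxRecDepth 40000 in
theorem chunk_47 : lineTerms "limited motion|restricted|limping" = ["limited motion", "restricted", "limping"] := by
  rw [lineTerms, show ("|".toList) = ['|'] from rfl, splitOn_eq_msplit,
    show ("limited motion|restricted|limping".toList) = ['|'].intercalate (["limited motion", "restricted", "limping"].map String.toList) from by decide,
    msplit_join '|' _ (by simp) (by decide)]
  decide

set_option maxRecDepth 40000 in
theorem chunk_48 : lineTerms "walking difficulty|difficulty walking" = ["walking difficulty", "difficulty walking"] := by
  rw [lineTerms, show ("|".toList) = ['|'] from rfl, splitOn_eq_msplit,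
    show ("walking difficulty|difficulty walking".toList) = ['|'].intercalate (["walking difficulty", "difficulty walking"].map String.toList) from by decide,
    msplit_join '|' _ (by simp) (by decide)]
  decide

set_option maxRecDepth 40000 in
theorem chunk_49 : lineTerms "relief|worse|better|aggravated|morning" = ["relief", "worse", "better", "aggravated", "morning"] := by
  rw [lineTerms, show ("|".toList) = ['|'] from rfl, splitOn_eq_msplit,
    show ("relief|worse|better|aggravated|morning".toList) = ['|'].intercalate (["relief", "worse", "better", "aggravated", "morning"].map String.toList) from by decide,
    msplit_join '|' _ (by simp) (by decide)]
  decide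

set_option maxRecDepth 40000 in
theorem chunk_50 : lineTerms "night pain|rest pain|weight bearing" = ["night pain", "rest pain", "weight bearing"] := by
  rw [lineTerms, show ("|".toList) = ['|'] from rfl, splitOn_eq_msplit,
    show ("night pain|rest pain|weight bearing".toList) = ['|'].intercalate (["night pain", "rest pain", "weight bearing"].map String.toList) from by decide,
    msplit_join '|' _ (by simp) (by decide)]
  decide

set_option maxRecDepth 40000 in
theorem chunk_51 : lineTerms "fever|rash|sweat|chills|weight loss" = ["fever", "rash", "sweat", "chills", "weight loss"] := by
  rw [lineTerms, show ("|".toList) = ['|'] from rfl, splitOn_eq_msplit,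
    show ("fever|rash|sweat|chills|weight loss".toList) = ['|'].intercalate (["fever", "rash", "sweat", "chills", "weight loss"].map String.toList) from by decide,
    msplit_join '|' _ (by simp) (by decide)]
  decide

set_option maxRecDepth 40000 in
theorem chunk_52 : lineTerms "leg pain|knee pain|hip pain" = ["leg pain", "knee pain", "hip pain"] := by
  rw [lineTerms, show ("|".toList) = ['|'] from rfl, splitOn_eq_msplit,
    show ("leg pain|knee pain|hip pain".toList) = ['|'].intercalate (["leg pain", "knee pain", "hip pain"].map String.toList) from by decide,
    msplit_join '|' _ (by simp) (by decide)]
  decide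

set_option maxRecDepth 40000 in
theorem chunk_53 : lineTerms "shoulder pain|wrist pain|ankle pain" = ["shoulder pain", "wrist pain", "ankle pain"] := by
  rw [lineTerms, show ("|".toList) = ['|'] from rfl, splitOn_eq_msplit,
    show ("shoulder pain|wrist pain|ankle pain".toList) = ['|'].intercalate (["shoulder pain", "wrist pain", "ankle pain"].map String.toList) from by decide,
    msplit_join '|' _ (by simp) (by decide)]
  decide

set_option maxRecDepth 40000 in
theorem chunk_54 : lineTerms "foot pain|heel pain|spine|lower back" = ["foot pain", "heel pain", "spine", "lower back"] := by
  rw [lineTerms, show ("|".toList) = ['|'] from rfl, splitOn_eq_msplit,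
    show ("foot pain|heel pain|spine|lower back".toList) = ['|'].intercalate (["foot pain", "heel pain", "spine", "lower back"].map String.toList) from by decide,
    msplit_join '|' _ (by simp) (by decide)]
  decide

set_option maxRecDepth 40000 in
theorem chunk_55 : lineTerms "upper back|neck|joint|nodule|erosion" = ["upper back", "neck", "joint", "nodule", "erosion"] := by
  rw [lineTerms, show ("|".toList) = ['|'] from rfl, splitOn_eq_msplit,
    show ("upper back|neck|joint|nodule|erosion".toList) = ['|'].intercalate (["upper back", "neck", "joint", "nodule", "erosion"].map String.toList) from by decide,
    msplit_join '|' _ (by simp) (by decide)]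
  decide

set_option maxRecDepth 40000 in
theorem chunk_56 : lineTerms "macrophage|cytokine|interleukin|tnf|il-6" = ["macrophage", "cytokine", "interleukin", "tnf", "il-6"] := by
  rw [lineTerms, show ("|".toList) = ['|'] from rfl, splitOn_eq_msplit,
    show ("macrophage|cytokine|interleukin|tnf|il-6".toList) = ['|'].intercalate (["macrophage", "cytokine", "interleukin", "tnf", "il-6"].map String.toList) from by decide,
    msplit_join '|' _ (by simp) (by decide)]
  decide

set_option maxRecDepth 40000 in
theorem chunk_57 : lineTerms "renal|hepatic|pulmonary|cardiac" = ["renal", "hepatic", "pulmonary", "cardiac"] := by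
  rw [lineTerms, show ("|".toList) = ['|'] from rfl, splitOn_eq_msplit,
    show ("renal|hepatic|pulmonary|cardiac".toList) = ['|'].intercalate (["renal", "hepatic", "pulmonary", "cardiac"].map String.toList) from by decide,
    msplit_join '|' _ (by simp) (by decide)]
  decide

set_option maxRecDepth 40000 in
theorem chunk_58 : lineTerms "neurological" = ["neurological"] := by
  rw [lineTerms, show ("|".toList) = ['|'] from rfl, splitOn_eq_msplit,
    show ("neurological".toList) = ['|'].intercalate (["neurological"].map String.toList) from by decide,
    msplit_join '|' _ (by simp) (by decide)]
  decide

-- splitting B's lines yields exactly A's term list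
set_option maxRecDepth 40000 in
theorem termList_eq : termList = medicalTerms := by
  rw [termList, termLines]
  simp only [List.flatMap_cons, List.flatMap_nil, chunk_0, chunk_1, chunk_2, chunk_3, chunk_4, chunk_5, chunk_6, chunk_7, chunk_8, chunk_9, chunk_10, chunk_11, chunk_12, chunk_13, chunk_14, chunk_15, chunk_16, chunk_17, chunk_18, chunk_19, chunk_20, chunk_21, chunk_22, chunk_23, chunk_24, chunk_25, chunk_26, chunk_27, chunk_28, chunk_29, chunk_30, chunk_31, chunk_32, chunk_33, chunk_34, chunk_35, chunk_36, chunk_37, chunk_38, chunk_39, chunk_40, chunk_41, chunk_42, chunk_43, chunk_44, chunk_45, chunk_46, chunk_47, chunk_48, chunk_49, chunk_50, chunk_51, chunk_52, chunk_53, chunk_54, chunk_55, chunk_56, chunk_57, chunk_58]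
  rfl

set_option maxRecDepth 20000 in
theorem medicalTerms_nonempty : ∀ t ∈ medicalTerms, t.toList ≠ [] := by decide

-- the bucket-building fold, characterised: getD c returns exactly the terms whose first char is c
theorem getD_bucketFold (ts : List String) (d : PySem.Dict Char (List String)) (c : Char) :
    (ts.foldl (fun d t => d.insert (firstCharKey t) (d.getD (firstCharKey t) [] ++ [t])) d).getD c []
      = d.getD c [] ++ ts.filter (fun t => firstCharKey t == c) := by
  induction ts generalizing d with
  | nil => simp
  | cons t ts ih =>
    simp only [List.foldl_cons, List.filter_cons, ih]
    by_cases h : firstCharKey t = c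
    · simp [h]
    · simp [PySem.Dict.getD_insert, h, Ne.symm h]

theorem termBuckets_getD (c : Char) :
    termBuckets.getD c [] = medicalTerms.filter (fun t => firstCharKey t == c) := by
  rw [termBuckets, termList_eq, getD_bucketFold]
  simp [PySem.Dict.getD_empty]

-- a nonempty prefix of c :: rest starts with c
theorem head_of_prefix_cons {t : List Char} {c : Char} {rest : List Char}
    (hne : t ≠ []) (hp : t <+: c :: rest) : t.head! = c := by
  obtain ⟨u, hu⟩ := hp
  cases t with
  | nil => exact absurd rfl hne
  | cons x xs =>
    simp only [List.cons_append, List.cons.injEq] at hu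
    simp [hu.1]

-- B's scan finds exactly the texts that contain some medical term
theorem scanFrom_iff (s : List Char) :
    scanFrom s = true ↔ ∃ t ∈ medicalTerms, t.toList <:+: s := by
  induction s with
  | nil =>
    simp only [scanFrom, Bool.false_eq_true, false_iff, not_exists, not_and]
    intro t ht hinf
    exact medicalTerms_nonempty t ht (by simpa using hinf)
  | cons c rest ih =>
    simp only [scanFrom, Bool.or_eq_true, ih, List.any_eq_true, termBuckets_getD,
      List.mem_filter, beq_iff_eq]
    constructor
    · rintro (⟨t, ⟨ht, _⟩, hsw⟩ | ⟨t, ht, hinf⟩)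
      · exact ⟨t, ht, ((PySem.Chars.startswith_iff _ _).1 hsw).isInfix⟩
      · exact ⟨t, ht, List.infix_cons_iff.2 (Or.inr hinf)⟩
    · rintro ⟨t, ht, hinf⟩
      rcases List.infix_cons_iff.1 hinf with hpre | hinf'
      · exact Or.inl ⟨t, ⟨ht, head_of_prefix_cons (medicalTerms_nonempty t ht) hpre⟩,
          (PySem.Chars.startswith_iff _ _).2 hpre⟩
      · exact Or.inr ⟨t, ht, hinf'⟩

theorem ports_agree (text : String) : is_medical_question text = is_medical_question_alt text := by
  rw [Bool.eq_iff_iff]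
  simp only [is_medical_question, is_medical_question_alt, List.any_eq_true, scanFrom_iff,
    PySem.Str.isIn_iff_infix]

-- ===== VERDICT (by name: the statement is the Claim_ definition above) =====
theorem is_medical_question_spec : Claim_equal_is_medical_question := by
  intro text _
  unfold Spec_is_medical_question
  exact ports_agree text
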